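-- pv_equiv track=rewrite | github.com/aged99oow/rikka | Rikka/Rikka.py | thkg_isshiki
-- ===== SOURCE A (Python) =====
-- def thkg_isshiki(hand):  # 一色(5)高み-2,アガり-1,聴牌2,一向聴1
--     discard_cndi = [0]*len(hand)
--     for c in range(1,7):
--         sq_match = [1]*len(hand)
--         for i,tile in enumerate(hand):
--             if tile[0]==c or tile[1]==c:
--                 sq_match[i] = 0
--         if sq_match.count(0)==len(hand):  # アガり-1
--             return [-1 if h[0]==h[1] else -2 for h in hand]
--         if sq_match.count(0)==len(hand)-1:  # 聴牌2
--             for i in range(len(hand)):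
--                 if sq_match[i]:
--                     discard_cndi[i] = 2
--         elif sq_match.count(0)==len(hand)-2:  # 一向聴1
--             for i in range(len(hand)):
--                 if sq_match[i] and discard_cndi[i]==0:
--                     discard_cndi[i] = 1
--     return discard_cndi
-- ===== SOURCE B (Python) =====
-- def thkg_isshiki(hand):  # per-tile scoring against global per-color non-match counts; no mutable discard array
--     counts = [sum(1 for t in hand if t[0] != c and t[1] != c) for c in range(1, 7)]
--     if 0 in counts:
--         return [-1 if h[0] == h[1] else -2 for h in hand]
--     def score(t):
--         best = 0
--         for c in range(1, 7):
--             if t[0] != c and t[1] != c: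
--                 if counts[c - 1] == 1:
--                     return 2
--                 if counts[c - 1] == 2:
--                     best = 1
--         return best
--     return [score(t) for t in hand]
-- ===== Notes on version B (the rewrite author's own statement) =====
-- stated objective: alternative
-- what changed: A mutates a shared discard array through six per-color marking scans with count()-driven branches; B computes the six per-color non-match counts once and then scores every tile independently with a pure per-tile function (2/1/0 from the counts of the colors the tile misses), building the result with no mutable state.
import Mathlib
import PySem

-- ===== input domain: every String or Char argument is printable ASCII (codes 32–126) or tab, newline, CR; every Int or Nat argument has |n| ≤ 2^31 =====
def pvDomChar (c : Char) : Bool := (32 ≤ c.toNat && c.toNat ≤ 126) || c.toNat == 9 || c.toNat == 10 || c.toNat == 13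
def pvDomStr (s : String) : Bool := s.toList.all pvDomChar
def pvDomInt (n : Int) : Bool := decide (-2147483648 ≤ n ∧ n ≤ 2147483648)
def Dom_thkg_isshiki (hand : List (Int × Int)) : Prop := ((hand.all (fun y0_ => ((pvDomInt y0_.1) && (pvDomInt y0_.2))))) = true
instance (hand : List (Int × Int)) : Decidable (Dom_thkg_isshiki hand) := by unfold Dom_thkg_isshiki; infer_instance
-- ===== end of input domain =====

-- B replaces A's mutable discard array and six per-color marking scans by global per-color
-- non-match counts plus an independent per-tile scoring function (objective: alternative).


-- ===== PORT A =====
-- `[-1 if h[0]==h[1] else -2 for h in hand]`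
def thkgA_win (hand : List (Int × Int)) : List Int :=
  hand.map (fun h => if h.1 = h.2 then (-1 : Int) else -2)

-- `sq_match = [1]*len(hand)` then the `for i,tile in enumerate(hand)` zeroing loop
def thkgA_sq (hand : List (Int × Int)) (c : Int) : List Int :=
  (PySem.List.enumerate hand).foldl
    (fun sq it => if it.2.1 = c ∨ it.2.2 = c then PySem.List.pySetD sq it.1 0 else sq)
    (List.replicate hand.length 1)

-- the `for c in range(1,7)` loop over `discard_cndi`, with the early return
def thkgA_go (hand : List (Int × Int)) : List Int → List Int → List Int
  | [], d => d
  | c :: cs, d =>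
    if (PySem.List.count (thkgA_sq hand c) 0 : Int) = (hand.length : Int) then thkgA_win hand
    else
      thkgA_go hand cs
        (if (PySem.List.count (thkgA_sq hand c) 0 : Int) = (hand.length : Int) - 1 then
          (PySem.List.pyRange 0 hand.length).foldl
            (fun d i => if PySem.List.pyGetD (thkgA_sq hand c) i 0 ≠ 0 then
                PySem.List.pySetD d i 2 else d) d
        else if (PySem.List.count (thkgA_sq hand c) 0 : Int) = (hand.length : Int) - 2 then
          (PySem.List.pyRange 0 hand.length).foldl
            (fun d i => if PySem.List.pyGetD (thkgA_sq hand c) i 0 ≠ 0 ∧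
                PySem.List.pyGetD d i 0 = 0 then PySem.List.pySetD d i 1 else d) d
        else d)

def thkg_isshiki (hand : List (Int × Int)) : List Int :=
  thkgA_go hand (PySem.List.pyRange 1 7) (List.replicate hand.length 0)

-- ===== PORT B =====
-- `counts = [sum(1 for t in hand if t[0] != c and t[1] != c) for c in range(1, 7)]`
def thkgB_counts (hand : List (Int × Int)) : List Int :=
  (PySem.List.pyRange 1 7).map (fun c =>
    hand.foldl (fun n t => if t.1 ≠ c ∧ t.2 ≠ c then n + 1 else n) (0 : Int))

-- `[-1 if h[0]==h[1] else -2 for h in hand]`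
def thkgB_win (hand : List (Int × Int)) : List Int :=
  hand.map (fun h => if h.1 = h.2 then (-1 : Int) else -2)

-- the `for c in range(1,7)` loop of `score`, with the early `return 2`
def thkgB_score (counts : List Int) (t : Int × Int) : List Int → Int → Int
  | [], best => best
  | c :: cs, best =>
    if t.1 ≠ c ∧ t.2 ≠ c then
      if PySem.List.pyGetD counts (c - 1) 0 = 1 then 2
      else thkgB_score counts t cs
        (if PySem.List.pyGetD counts (c - 1) 0 = 2 then 1 else best)
    else thkgB_score counts t cs best

def thkg_isshiki_alt (hand : List (Int × Int)) : List Int :=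
  if (thkgB_counts hand).contains 0 then thkgB_win hand
  else hand.map (fun t => thkgB_score (thkgB_counts hand) t (PySem.List.pyRange 1 7) 0)

-- ===== PRECONDITION & SPEC =====
def Spec_thkg_isshiki (hand : List (Int × Int)) (out : List Int) : Prop := out = thkg_isshiki_alt hand
instance (hand : List (Int × Int)) (out : List Int) : Decidable (Spec_thkg_isshiki hand out) := by unfold Spec_thkg_isshiki; infer_instance

-- ===== CLAIM (what is proved, stated in full; the proofs are below) =====
def Claim_equal_thkg_isshiki : Prop := ∀ (hand : List (Int × Int)), Dom_thkg_isshiki hand → Spec_thkg_isshiki hand (thkg_isshiki hand)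

-- ===== LEMMAS AND PROOFS =====

-- proof-side helpers
def thkgQ (c : Int) (t : Int × Int) : Bool := !(t.1 == c) && !(t.2 == c)

def thkgG (c : Int) (t : Int × Int) : Int := if t.1 = c ∨ t.2 = c then 0 else 1

-- number of tiles of `hand` not matching colour `c`
def mcount (c : Int) (hand : List (Int × Int)) : Nat := hand.countP (thkgQ c)

-- the effect of one colour of A's loop on the discard value of a tile `t`
def pointStep (hand : List (Int × Int)) (c : Int) (t : Int × Int) (v : Int) : Int :=
  if thkgQ c t ∧ mcount c hand = 1 then 2
  else if thkgQ c t ∧ mcount c hand = 2 ∧ v = 0 then 1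
  else v

-- non-matching indices of the tiles of `hand`, numbered from `k`
def nonIdxE (c : Int) (hand : List (Int × Int)) (k : Int) : List Int :=
  ((PySem.List.enumerate hand k).filter (fun it => thkgQ c it.2)).map Prod.fst

-- the same indices as naturals
def nonRange (c : Int) (hand : List (Int × Int)) : List Nat :=
  (List.range hand.length).filter (fun j => thkgQ c (hand.getD j (0, 0)))

theorem pyRangeSix : PySem.List.pyRange 1 7 = [1, 2, 3, 4, 5, 6] := by decide

theorem thkgG_beq_zero (c : Int) (t : Int × Int) : (thkgG c t == 0) = !(thkgQ c t) := by
  by_cases h1 : t.1 = c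
  · simp [thkgG, thkgQ, h1]
  · by_cases h2 : t.2 = c <;> simp [thkgG, thkgQ, h1, h2]

theorem nonIdxE_cons (c : Int) (t : Int × Int) (hand : List (Int × Int)) (k : Int) :
    nonIdxE c (t :: hand) k = (if thkgQ c t then [k] else []) ++ nonIdxE c hand (k + 1) := by
  unfold nonIdxE
  show ((((k, t) :: PySem.List.enumerate hand (k+1)).filter _).map _) = _
  rw [List.filter_cons]; split <;> simp

theorem nonIdxE_len (c : Int) (hand : List (Int × Int)) : ∀ (k : Int),
    (nonIdxE c hand k).length = mcount c hand := by
  induction hand with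
  | nil => intro k; rfl
  | cons t rest ih =>
    intro k
    rw [nonIdxE_cons, mcount, List.countP_cons]
    simp only [List.length_append, ih, mcount]
    split
    · simp; omega
    · simp

-- the range-based view of nonIdxE
theorem nonIdxE_range (c : Int) (hand : List (Int × Int)) : ∀ (k : Nat),
    nonIdxE c hand (k : Int)
      = ((List.range hand.length).filter (fun j => thkgQ c (hand.getD j (0, 0)))).map
          (fun j => ((k + j : Nat) : Int)) := by
  induction hand with
  | nil => intro k; rfl
  | cons t rest ih =>
    intro k
    rw [nonIdxE_cons]
    have h1 : ((k : Int) + 1) = ((k + 1 : Nat) : Int) := by push_cast; ring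
    rw [h1, ih (k + 1)]
    rw [List.length_cons, List.range_succ_eq_map, List.filter_cons]
    simp only [List.getD_cons_zero, List.filter_map, Function.comp_def, Nat.succ_eq_add_one,
      List.getD_cons_succ]
    have h2 : ((fun j => ((k + j : Nat) : Int)) ∘ Nat.succ) = fun j => ((k + 1 + j : Nat) : Int) := by
      funext j; simp only [Function.comp_apply, Nat.succ_eq_add_one]; congr 1; omega
    split <;> simp only [List.map_cons, Nat.add_zero, List.cons_append, List.nil_append,
      List.map_map, h2]

theorem nonIdxE_zero (c : Int) (hand : List (Int × Int)) :
    nonIdxE c hand 0 = (nonRange c hand).map (fun j : Nat => (j : Int)) := by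
  unfold nonRange
  have h := nonIdxE_range c hand 0
  simp only [Nat.cast_zero, Nat.zero_add] at h
  exact h

theorem len_nonRange (c : Int) (hand : List (Int × Int)) :
    (nonRange c hand).length = mcount c hand := by
  have h := nonIdxE_len c hand 0
  rw [nonIdxE_zero] at h
  simpa using h

theorem mem_nonRange (c : Int) (hand : List (Int × Int)) (j : Nat) :
    j ∈ nonRange c hand ↔ j < hand.length ∧ thkgQ c (hand.getD j (0, 0)) = true := by
  simp [nonRange, List.mem_filter]

theorem pairwise_nonRange (c : Int) (hand : List (Int × Int)) :
    (nonRange c hand).Pairwise (· < ·) :=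
  (List.pairwise_lt_range).filter _

-- the loop invariant of A's sq_match-building loop
theorem sqInv (c : Int) : ∀ (hand : List (Int × Int)) (k : Nat) (s : List Int),
    k ≤ s.length → s.drop k = List.replicate hand.length 1 →
    (PySem.List.enumerate hand (k : Int)).foldl
      (fun sq it => if it.2.1 = c ∨ it.2.2 = c then PySem.List.pySetD sq it.1 0 else sq) s
    = s.take k ++ hand.map (thkgG c) := by
  intro hand
  induction hand with
  | nil =>
    intro k s hk hdrop
    simp only [List.length_nil, List.replicate_zero] at hdrop
    show s = _
    simp only [List.map_nil, List.append_nil]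
    rw [← List.take_append_drop k s, hdrop, List.append_nil, List.take_take]
    simp
  | cons t rest ih =>
    intro k s hk hdrop
    have hsk : s[k]? = some 1 := by
      rw [← Nat.add_zero k, ← List.getElem?_drop, hdrop]
      simp [List.length_replicate]
    have hklt : k < s.length := by
      have := List.getElem?_eq_some_iff.mp hsk
      exact this.choose
    show (PySem.List.enumerate rest ((k : Int) + 1)).foldl _
        (if t.1 = c ∨ t.2 = c then PySem.List.pySetD s (k : Int) 0 else s) = _
    have hcast : ((k : Int) + 1) = ((k + 1 : Nat) : Int) := by push_cast; ring
    rw [hcast]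
    set s' := (if t.1 = c ∨ t.2 = c then PySem.List.pySetD s (k : Int) 0 else s) with hs'
    have hset : s' = if t.1 = c ∨ t.2 = c then s.set k 0 else s := by
      rw [hs']; split <;> simp [PySem.List.pySetD_natCast]
    have hlen' : k + 1 ≤ s'.length := by rw [hset]; split <;> simp <;> omega
    have hdrop' : s'.drop (k + 1) = List.replicate rest.length 1 := by
      have hd : s.drop (k + 1) = List.replicate rest.length 1 := by
        rw [← List.drop_drop (i := 1) (j := k), hdrop]
        simp [List.replicate_succ]
      rw [hset]; split
      · rw [List.drop_set]; split
        · exact hd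
        · omega
      · exact hd
    have htake : s'.take (k + 1) = s.take k ++ [thkgG c t] := by
      have ht : s.take (k + 1) = s.take k ++ [1] := by
        rw [List.take_add_one, hsk]; rfl
      rw [hset, thkgG]; split
      · rw [List.take_set, ht]
        rw [List.set_append]
        simp [List.length_take, Nat.min_eq_left (le_of_lt hklt)]
      · rw [ht]
    rw [ih (k + 1) s' hlen' hdrop', htake]
    simp [List.map_cons]

-- A's sq_match list is the pointwise map of thkgG
theorem sq_eq_map (hand : List (Int × Int)) (c : Int) :
    thkgA_sq hand c = hand.map (thkgG c) := by
  unfold thkgA_sq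
  have := sqInv c hand 0 (List.replicate hand.length 1) (by simp) (by simp)
  simpa using this

theorem count_sq (hand : List (Int × Int)) (c : Int) :
    PySem.List.count (thkgA_sq hand c) 0 + mcount c hand = hand.length := by
  rw [sq_eq_map]
  show List.count 0 _ + _ = _
  rw [List.count_eq_countP, List.countP_map]
  have h1 : List.countP ((fun x => x == (0 : Int)) ∘ thkgG c) hand
      = List.countP (fun a => !(thkgQ c a)) hand := by
    apply List.countP_congr; intro t _
    simp only [Function.comp_apply, thkgG_beq_zero]
  have hlf := List.length_eq_length_filter_add (l := hand) (thkgQ c)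
  rw [← List.countP_eq_length_filter, ← List.countP_eq_length_filter] at hlf
  rw [h1, mcount]
  omega

theorem filter_range_eq (hand : List (Int × Int)) (c : Int) :
    (PySem.List.pyRange 0 (hand.length : Int)).filter
        (fun i => !(PySem.List.pyGetD (thkgA_sq hand c) i 0 == 0))
      = nonIdxE c hand 0 := by
  rw [PySem.List.pyRange_zero_natCast, List.filter_map]
  have hnon := nonIdxE_range c hand 0
  simp only [Nat.cast_zero, Nat.zero_add] at hnon
  rw [hnon]
  congr 1
  apply List.filter_congr; intro j hj
  rw [List.mem_range] at hj
  simp only [Function.comp_apply]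
  rw [sq_eq_map, PySem.List.pyGetD_natCast]
  rw [List.getD_eq_getElem _ 0 (by simpa using hj), List.getElem_map,
    List.getD_eq_getElem hand (0, 0) hj, thkgG_beq_zero, Bool.not_not]

theorem upd2_eq (hand : List (Int × Int)) (c : Int) (d : List Int) :
    (PySem.List.pyRange 0 (hand.length : Int)).foldl
        (fun d i => if PySem.List.pyGetD (thkgA_sq hand c) i 0 ≠ 0 then PySem.List.pySetD d i 2 else d) d
      = (nonIdxE c hand 0).foldl (fun d i => PySem.List.pySetD d i 2) d := by
  rw [← filter_range_eq hand c, List.foldl_filter]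
  apply PySem.List.foldl_congr_mem
  intro acc i _
  by_cases h : PySem.List.pyGetD (thkgA_sq hand c) i 0 = 0 <;> simp [h]

theorem upd1_eq (hand : List (Int × Int)) (c : Int) (d : List Int) :
    (PySem.List.pyRange 0 (hand.length : Int)).foldl
        (fun d i => if PySem.List.pyGetD (thkgA_sq hand c) i 0 ≠ 0 ∧ PySem.List.pyGetD d i 0 = 0 then
            PySem.List.pySetD d i 1 else d) d
      = (nonIdxE c hand 0).foldl
          (fun d i => if PySem.List.pyGetD d i 0 = 0 then PySem.List.pySetD d i 1 else d) d := by
  rw [← filter_range_eq hand c, List.foldl_filter]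
  apply PySem.List.foldl_congr_mem
  intro acc i _
  by_cases h : PySem.List.pyGetD (thkgA_sq hand c) i 0 = 0 <;>
    by_cases h2 : PySem.List.pyGetD acc i 0 = 0 <;> simp [h, h2]

-- mcount is at most the hand size
theorem mcount_le (c : Int) (hand : List (Int × Int)) : mcount c hand ≤ hand.length :=
  List.countP_le_length

-- A's one-colour update acts pointwise as pointStep
theorem upd_eq_mapIdx (hand : List (Int × Int)) (c : Int) (d : List Int)
    (hd : d.length = hand.length) :
    (if (PySem.List.count (thkgA_sq hand c) 0 : Int) = (hand.length : Int) - 1 then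
      (PySem.List.pyRange 0 hand.length).foldl
        (fun d i => if PySem.List.pyGetD (thkgA_sq hand c) i 0 ≠ 0 then
            PySem.List.pySetD d i 2 else d) d
    else if (PySem.List.count (thkgA_sq hand c) 0 : Int) = (hand.length : Int) - 2 then
      (PySem.List.pyRange 0 hand.length).foldl
        (fun d i => if PySem.List.pyGetD (thkgA_sq hand c) i 0 ≠ 0 ∧
            PySem.List.pyGetD d i 0 = 0 then PySem.List.pySetD d i 1 else d) d
    else d)
    = d.mapIdx (fun j v => pointStep hand c (hand.getD j (0, 0)) v) := by
  have hcnt := count_sq hand c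
  have hle := mcount_le c hand
  by_cases h1 : mcount c hand = 1
  · rw [if_pos (by omega : (PySem.List.count (thkgA_sq hand c) 0 : Int) = (hand.length : Int) - 1)]
    rw [upd2_eq, nonIdxE_zero]
    have hl : (nonRange c hand).length = 1 := by rw [len_nonRange, h1]
    obtain ⟨j0, hj0⟩ := List.length_eq_one_iff.mp hl
    rw [hj0]
    have hj0mem := (mem_nonRange c hand j0).mp (by rw [hj0]; exact List.mem_singleton_self j0)
    simp only [List.map_cons, List.map_nil, List.foldl_cons, List.foldl_nil,
      PySem.List.pySetD_natCast]
    apply List.ext_getElem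
    · simp
    · intro j hja hjb
      simp only [List.getElem_set, List.getElem_mapIdx]
      have hjd : j < d.length := by simpa [apply_ite List.length] using hja
      have hja : j < hand.length := hd ▸ hjd
      have hget : hand.getD j (0, 0) = hand[j] := List.getD_eq_getElem hand (0, 0) hja
      by_cases hje : j0 = j
      · subst hje
        rw [if_pos rfl, pointStep, if_pos]
        refine ⟨?_, h1⟩
        rw [hget] at hj0mem ⊢
        exact hj0mem.2
      · rw [if_neg hje, pointStep]
        have hq : ¬ thkgQ c (hand.getD j (0, 0)) = true := by
          intro hq
          have : j ∈ nonRange c hand := (mem_nonRange c hand j).mpr ⟨hja, hq⟩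
          rw [hj0] at this
          exact hje (List.mem_singleton.mp this).symm
        rw [if_neg (fun hh => hq hh.1), if_neg (fun hh => hq hh.1)]
  · by_cases h2 : mcount c hand = 2
    · rw [if_neg (by omega), if_pos (by omega :
        (PySem.List.count (thkgA_sq hand c) 0 : Int) = (hand.length : Int) - 2)]
      rw [upd1_eq, nonIdxE_zero]
      have hl : (nonRange c hand).length = 2 := by rw [len_nonRange, h2]
      obtain ⟨j0, j1, hj01⟩ := List.length_eq_two.mp hl
      have hpw := pairwise_nonRange c hand
      rw [hj01] at hpw
      have hne : j0 ≠ j1 := Nat.ne_of_lt (by simpa using (List.pairwise_cons.mp hpw).1 j1 (by simp))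
      have hm0 := (mem_nonRange c hand j0).mp (by rw [hj01]; simp)
      have hm1 := (mem_nonRange c hand j1).mp (by rw [hj01]; simp)
      rw [hj01]
      simp only [List.map_cons, List.map_nil, List.foldl_cons, List.foldl_nil,
        PySem.List.pyGetD_natCast, PySem.List.pySetD_natCast]
      apply List.ext_getElem
      · simp only [List.length_mapIdx]
        split_ifs <;> simp [hd]
      · intro j hja hjb
        rw [List.getElem_mapIdx]
        have hjd : j < d.length := by simpa [apply_ite List.length] using hja
        have hja2 : j < hand.length := hd ▸ hjd
        have hget : hand.getD j (0, 0) = hand[j] := List.getD_eq_getElem hand (0, 0) hja2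
        have hgd : d[j] = d.getD j 0 := (List.getD_eq_getElem d 0 hjd).symm
        have hset01 : (d.set j0 1).getD j1 0 = d.getD j1 0 := by
          simp [List.getD_eq_getElem?_getD, List.getElem?_set_ne hne]
        have hqother : j ≠ j0 → j ≠ j1 → pointStep hand c (hand.getD j (0, 0)) d[j] = d[j] := by
          intro h0 h1
          have hq : ¬ thkgQ c (hand.getD j (0, 0)) = true := by
            intro hq
            have : j ∈ nonRange c hand := (mem_nonRange c hand j).mpr ⟨hja2, hq⟩
            rw [hj01] at this
            simp only [List.mem_cons, List.not_mem_nil, or_false] at this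
            rcases this with h | h
            · exact h0 h
            · exact h1 h
          rw [pointStep, if_neg (fun hh => hq hh.1), if_neg (fun hh => hq hh.1)]
        have hpt : ∀ v : Int, thkgQ c (hand.getD j (0, 0)) = true → v = 0 →
            pointStep hand c (hand.getD j (0, 0)) v = 1 := by
          intro v hqv hv
          rw [pointStep, if_neg (fun hh => h1 hh.2), if_pos ⟨hqv, h2, hv⟩]
        have hpv : ∀ v : Int, v ≠ 0 → pointStep hand c (hand.getD j (0, 0)) v = v := by
          intro v hv
          rw [pointStep, if_neg (fun hh => h1 hh.2), if_neg (fun hh => hv hh.2.2)]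
        by_cases hb0 : d.getD j0 0 = 0
        · by_cases hb1 : d.getD j1 0 = 0
          · simp only [if_pos hb0, hset01, if_pos hb1, List.getElem_set]
            by_cases hje1 : j1 = j
            · rw [if_pos hje1]
              exact (hpt _ (by rw [← hje1]; exact hm1.2) (by rw [hgd, ← hje1]; exact hb1)).symm
            · rw [if_neg hje1]
              by_cases hje0 : j0 = j
              · rw [if_pos hje0]
                exact (hpt _ (by rw [← hje0]; exact hm0.2) (by rw [hgd, ← hje0]; exact hb0)).symm
              · rw [if_neg hje0]
                exact (hqother (fun hh => hje0 hh.symm) (fun hh => hje1 hh.symm)).symm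
          · simp only [if_pos hb0, hset01, if_neg hb1, List.getElem_set]
            by_cases hje0 : j0 = j
            · rw [if_pos hje0]
              exact (hpt _ (by rw [← hje0]; exact hm0.2) (by rw [hgd, ← hje0]; exact hb0)).symm
            · rw [if_neg hje0]
              by_cases hje1 : j1 = j
              · exact (hpv _ (fun hv => hb1 (by rw [hje1]; exact hgd.symm.trans hv))).symm
              · exact (hqother (fun hh => hje0 hh.symm) (fun hh => hje1 hh.symm)).symm
        · by_cases hb1 : d.getD j1 0 = 0
          · simp only [if_neg hb0, if_pos hb1, List.getElem_set]
            by_cases hje1 : j1 = j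
            · rw [if_pos hje1]
              exact (hpt _ (by rw [← hje1]; exact hm1.2) (by rw [hgd, ← hje1]; exact hb1)).symm
            · rw [if_neg hje1]
              by_cases hje0 : j0 = j
              · exact (hpv _ (fun hv => hb0 (by rw [hje0]; exact hgd.symm.trans hv))).symm
              · exact (hqother (fun hh => hje0 hh.symm) (fun hh => hje1 hh.symm)).symm
          · simp only [if_neg hb0, if_neg hb1]
            by_cases hje0 : j0 = j
            · exact (hpv _ (fun hv => hb0 (by rw [hje0]; exact hgd.symm.trans hv))).symm
            · by_cases hje1 : j1 = j
              · exact (hpv _ (fun hv => hb1 (by rw [hje1]; exact hgd.symm.trans hv))).symm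
              · exact (hqother (fun hh => hje0 hh.symm) (fun hh => hje1 hh.symm)).symm
    · rw [if_neg (by omega : ¬ (PySem.List.count (thkgA_sq hand c) 0 : Int) = (hand.length : Int) - 1),
        if_neg (by omega : ¬ (PySem.List.count (thkgA_sq hand c) 0 : Int) = (hand.length : Int) - 2)]
      apply List.ext_getElem
      · simp
      · intro j hja hjb
        rw [List.getElem_mapIdx, pointStep,
          if_neg (fun hh => h1 hh.2), if_neg (fun hh => h2 hh.2.1)]

-- A's colour loop acts pointwise as the fold of pointStep
theorem go_mapIdx (hand : List (Int × Int)) : ∀ (cs : List Int) (d : List Int),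
    (∀ c ∈ cs, mcount c hand ≠ 0) → d.length = hand.length →
    thkgA_go hand cs d
      = d.mapIdx (fun j v =>
          cs.foldl (fun v c => pointStep hand c (hand.getD j (0, 0)) v) v) := by
  intro cs
  induction cs with
  | nil =>
    intro d _ _
    show d = _
    apply List.ext_getElem <;> simp
  | cons c cs ih =>
    intro d hcs hd
    have hc : mcount c hand ≠ 0 := hcs c List.mem_cons_self
    have hcnt := count_sq hand c
    show (if (PySem.List.count (thkgA_sq hand c) 0 : Int) = (hand.length : Int) then _ else _) = _
    rw [if_neg (by omega : ¬ (PySem.List.count (thkgA_sq hand c) 0 : Int) = (hand.length : Int))]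
    rw [upd_eq_mapIdx hand c d hd]
    rw [ih _ (fun c' hc' => hcs c' (List.mem_cons_of_mem _ hc')) (by simp [hd])]
    rw [List.mapIdx_mapIdx]
    simp only [Function.comp_def, List.foldl_cons]

-- if some colour matches the whole hand, A returns the win list
theorem go_win (hand : List (Int × Int)) : ∀ (cs : List Int) (d : List Int),
    (∃ c ∈ cs, mcount c hand = 0) → thkgA_go hand cs d = thkgA_win hand := by
  intro cs
  induction cs with
  | nil => rintro d ⟨c, hc, -⟩; exact absurd hc (List.not_mem_nil)
  | cons c cs ih =>
    rintro d ⟨c', hc', hm⟩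
    have hcnt := count_sq hand c
    show (if (PySem.List.count (thkgA_sq hand c) 0 : Int) = (hand.length : Int) then _ else _) = _
    by_cases h : mcount c hand = 0
    · rw [if_pos (by omega)]
    · rcases List.mem_cons.mp hc' with rfl | hmem
      · exact absurd hm h
      · rw [if_neg (by omega)]
        exact ih _ ⟨c', hmem, hm⟩

-- B's inner sum computes mcount
theorem foldl_cnt (c : Int) (hand : List (Int × Int)) : ∀ (k : Int),
    hand.foldl (fun n t => if t.1 ≠ c ∧ t.2 ≠ c then n + 1 else n) k
      = k + (mcount c hand : Int) := by
  induction hand with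
  | nil => intro k; simp [mcount]
  | cons t rest ih =>
    intro k
    by_cases h : t.1 ≠ c ∧ t.2 ≠ c
    · have hq : thkgQ c t = true := by simp [thkgQ, h.1, h.2]
      have hm' : mcount c (t :: rest) = mcount c rest + 1 := by
        simp [mcount, hq]
      rw [List.foldl_cons, if_pos h, ih, hm']; push_cast; ring
    · have hq : thkgQ c t = false := by simp only [thkgQ]; simp; tauto
      have hm' : mcount c (t :: rest) = mcount c rest := by
        simp [mcount, hq]
      rw [List.foldl_cons, if_neg h, ih, hm']

theorem counts_explicit (hand : List (Int × Int)) :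
    thkgB_counts hand = [((mcount 1 hand : Nat) : Int), (mcount 2 hand : Nat),
      (mcount 3 hand : Nat), (mcount 4 hand : Nat), (mcount 5 hand : Nat),
      (mcount 6 hand : Nat)] := by
  unfold thkgB_counts
  rw [pyRangeSix]
  simp only [List.map_cons, List.map_nil, foldl_cnt]
  norm_num

theorem counts_get (hand : List (Int × Int)) (c : Int) (hc : c ∈ PySem.List.pyRange 1 7) :
    PySem.List.pyGetD (thkgB_counts hand) (c - 1) 0 = ((mcount c hand : Nat) : Int) := by
  rw [pyRangeSix] at hc
  rw [counts_explicit]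
  fin_cases hc <;> norm_num <;>
    simp [PySem.List.pyGetD, PySem.List.pyGet?, PySem.List.pyIdx?]

theorem contains_zero_iff (hand : List (Int × Int)) :
    (thkgB_counts hand).contains 0 = true ↔ ∃ c ∈ PySem.List.pyRange 1 7, mcount c hand = 0 := by
  rw [counts_explicit, pyRangeSix, List.contains_iff_mem]
  constructor
  · intro h
    simp only [List.mem_cons, List.not_mem_nil, or_false] at h
    rcases h with h | h | h | h | h | h
    · exact ⟨1, by simp, by exact_mod_cast h.symm⟩
    · exact ⟨2, by simp, by exact_mod_cast h.symm⟩
    · exact ⟨3, by simp, by exact_mod_cast h.symm⟩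
    · exact ⟨4, by simp, by exact_mod_cast h.symm⟩
    · exact ⟨5, by simp, by exact_mod_cast h.symm⟩
    · exact ⟨6, by simp, by exact_mod_cast h.symm⟩
  · rintro ⟨c, hc, hm⟩
    fin_cases hc <;> rw [hm] <;> simp

-- a discard value of 2 is absorbing for pointStep
theorem fold_two (hand : List (Int × Int)) (t : Int × Int) : ∀ (cs : List Int),
    cs.foldl (fun v c => pointStep hand c t v) 2 = 2 := by
  intro cs
  induction cs with
  | nil => rfl
  | cons c cs ih =>
    rw [List.foldl_cons]
    have : pointStep hand c t 2 = 2 := by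
      rw [pointStep]
      split
      · rfl
      · rw [if_neg (by rintro ⟨-, -, h⟩; exact absurd h (by norm_num))]
    rw [this, ih]

-- B's score loop is the fold of pointStep
theorem score_eq (hand : List (Int × Int)) (t : Int × Int) : ∀ (cs : List Int) (best : Int),
    (∀ c ∈ cs, c ∈ PySem.List.pyRange 1 7) → (best = 0 ∨ best = 1) →
    thkgB_score (thkgB_counts hand) t cs best
      = cs.foldl (fun v c => pointStep hand c t v) best := by
  intro cs
  induction cs with
  | nil => intro best _ _; rfl
  | cons c cs ih =>
    intro best hcs hbest
    have hget := counts_get hand c (hcs c List.mem_cons_self)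
    have hrest : ∀ c' ∈ cs, c' ∈ PySem.List.pyRange 1 7 :=
      fun c' h => hcs c' (List.mem_cons_of_mem _ h)
    rw [List.foldl_cons]
    by_cases hq : t.1 ≠ c ∧ t.2 ≠ c
    · have hqt : thkgQ c t = true := by simp [thkgQ, hq.1, hq.2]
      show (if t.1 ≠ c ∧ t.2 ≠ c then _ else _) = _
      rw [if_pos hq]
      by_cases h1 : mcount c hand = 1
      · rw [if_pos (by rw [hget, h1]; norm_num)]
        have hp : pointStep hand c t best = 2 := by rw [pointStep, if_pos ⟨hqt, h1⟩]
        rw [hp, fold_two]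
      · rw [if_neg (by rw [hget]; exact_mod_cast fun hh => h1 (by exact_mod_cast hh))]
        by_cases h2 : mcount c hand = 2
        · rw [if_pos (by rw [hget, h2]; norm_num)]
          have hp : pointStep hand c t best = 1 := by
            rcases hbest with rfl | rfl
            · rw [pointStep, if_neg (fun hh => h1 hh.2), if_pos ⟨hqt, h2, rfl⟩]
            · rw [pointStep, if_neg (fun hh => h1 hh.2),
                if_neg (by rintro ⟨-, -, h⟩; exact absurd h (by norm_num))]
          rw [hp]
          exact ih 1 hrest (Or.inr rfl)
        · rw [if_neg (by rw [hget]; exact_mod_cast fun hh => h2 (by exact_mod_cast hh))]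
          have hp : pointStep hand c t best = best := by
            rw [pointStep, if_neg (fun hh => h1 hh.2), if_neg (fun hh => h2 hh.2.1)]
          rw [hp]
          exact ih best hrest hbest
    · have hqt : thkgQ c t = false := by simp only [thkgQ]; simp; tauto
      show (if t.1 ≠ c ∧ t.2 ≠ c then _ else _) = _
      rw [if_neg hq]
      have hp : pointStep hand c t best = best := by
        rw [pointStep, if_neg (by rw [hqt]; rintro ⟨h, -⟩; exact Bool.false_ne_true h),
          if_neg (by rw [hqt]; rintro ⟨h, -⟩; exact Bool.false_ne_true h)]
      rw [hp]
      exact ih best hrest hbest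

-- ===== VERDICT (by name: the statement is the Claim_ definition above) =====
theorem thkg_isshiki_spec : Claim_equal_thkg_isshiki := by
  intro hand _
  unfold Spec_thkg_isshiki thkg_isshiki thkg_isshiki_alt
  by_cases h0 : (thkgB_counts hand).contains 0 = true
  · rw [if_pos h0, go_win hand _ _ ((contains_zero_iff hand).mp h0)]
    rfl
  · rw [if_neg h0]
    have hno : ∀ c ∈ PySem.List.pyRange 1 7, mcount c hand ≠ 0 := by
      intro c hc hm
      exact h0 ((contains_zero_iff hand).mpr ⟨c, hc, hm⟩)
    rw [go_mapIdx hand _ _ hno (by simp)]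
    apply List.ext_getElem
    · simp
    · intro j hja hjb
      simp only [List.getElem_mapIdx, List.getElem_replicate, List.getElem_map]
      rw [score_eq hand _ _ 0 (fun c hc => hc) (Or.inl rfl)]
      rw [List.getD_eq_getElem hand (0, 0) (by simpa using hja)]
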